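-- pv_equiv track=rewrite | github.com/Christian74D/Timetablo-An-GCFSA-GA-Implementation | data/generate_lunches.py | create_lunch_rows
-- ===== SOURCE A (Python) =====
-- def create_lunch_rows(lunch_allocations, sections, days, lunch_hours):
--     lunch_rows = []
--     for day in range(days):
--         for hour in lunch_hours:
--             secs = [s for s in sections if lunch_allocations[s][day] == hour]
--             if secs:
--                 lunch_rows.append({
--                     'sections': ', '.join(secs),
--                     'subjects': f'LUNCH_DAY_{day+1}_HOUR_{hour}',
--                     'staffs': '',
--                     'theory': '',
--                     'lab': '',
--                     'block': f'({day+1},{hour})'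
--                 })
--     return lunch_rows
-- ===== SOURCE B (Python) =====
-- def _lunch_row(day, hour, secs):
--     return {'sections': ', '.join(secs),
--             'subjects': f'LUNCH_DAY_{day+1}_HOUR_{hour}',
--             'staffs': '',
--             'theory': '',
--             'lab': '',
--             'block': f'({day+1},{hour})'}
--
--
-- def _day_lunch_rows(lunch_allocations, sections, lunch_hours, day):
--     buckets = {}
--     for s in sections:
--         buckets.setdefault(lunch_allocations[s][day], []).append(s)
--     return [_lunch_row(day, h, buckets[h]) for h in lunch_hours if buckets.get(h)]
--
--
-- def create_lunch_rows(lunch_allocations, sections, days, lunch_hours):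
--     if not lunch_hours:
--         return []
--     return [row
--             for day in range(days)
--             for row in _day_lunch_rows(lunch_allocations, sections, lunch_hours, day)]
-- ===== Notes on version B (the rewrite author's own statement) =====
-- stated objective: faster
-- what changed: B is decomposed into a per-day helper that buckets sections by allocated hour in one pass and emits its day's rows as a comprehension (filter+map over lunch_hours), and the result is the flattening of the per-day row lists, replacing A's accumulator fold that rescans all sections for every (day, hour) pair.
import Mathlib
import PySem

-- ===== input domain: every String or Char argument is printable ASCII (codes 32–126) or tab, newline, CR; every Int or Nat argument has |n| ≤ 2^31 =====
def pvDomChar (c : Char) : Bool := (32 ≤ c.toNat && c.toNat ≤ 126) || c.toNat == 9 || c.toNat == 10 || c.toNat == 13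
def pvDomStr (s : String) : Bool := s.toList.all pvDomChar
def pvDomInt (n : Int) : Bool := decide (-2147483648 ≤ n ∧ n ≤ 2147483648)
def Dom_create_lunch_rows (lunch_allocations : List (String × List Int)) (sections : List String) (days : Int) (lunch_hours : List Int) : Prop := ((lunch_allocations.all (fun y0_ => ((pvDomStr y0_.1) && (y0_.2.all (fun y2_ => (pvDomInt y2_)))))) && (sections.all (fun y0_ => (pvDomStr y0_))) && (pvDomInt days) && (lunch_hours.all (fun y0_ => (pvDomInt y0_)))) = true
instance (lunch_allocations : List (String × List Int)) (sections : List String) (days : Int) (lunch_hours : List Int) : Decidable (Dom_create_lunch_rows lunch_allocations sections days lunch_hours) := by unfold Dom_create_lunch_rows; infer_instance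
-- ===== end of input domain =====

-- B replaces A's per-(day,hour) rescan of `sections` by a per-day helper that
-- buckets sections by hour in one pass and emits that day's rows as filter+map,
-- flattened over the days (objective: faster).

-- ===== PORT A =====
def create_lunch_rows (lunch_allocations : List (String × List Int)) (sections : List String) (days : Int) (lunch_hours : List Int) : List (List (String × String)) :=
  (PySem.List.pyRange 0 days 1).foldl (fun lunch_rows day =>
    lunch_hours.foldl (fun lunch_rows hour =>
      let secs := sections.filter (fun s =>
        ((PySem.Dict.get? (PySem.Dict.mk lunch_allocations) s).bind
          (fun l => PySem.List.pyGet? l day)) == some hour)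
      if secs.isEmpty then lunch_rows
      else lunch_rows ++ [[("sections", PySem.Str.join ", " secs),
                           ("subjects", "LUNCH_DAY_" ++ PySem.Int.toStr (day + 1) ++ "_HOUR_" ++ PySem.Int.toStr hour),
                           ("staffs", ""), ("theory", ""), ("lab", ""),
                           ("block", "(" ++ PySem.Int.toStr (day + 1) ++ "," ++ PySem.Int.toStr hour ++ ")")]]) lunch_rows) []

-- ===== PORT B =====
-- _lunch_row(day, hour, secs)
def pvLunchRow (day : Int) (hour : Int) (secs : List String) : List (String × String) :=
  [("sections", PySem.Str.join ", " secs),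
   ("subjects", "LUNCH_DAY_" ++ PySem.Int.toStr (day + 1) ++ "_HOUR_" ++ PySem.Int.toStr hour),
   ("staffs", ""), ("theory", ""), ("lab", ""),
   ("block", "(" ++ PySem.Int.toStr (day + 1) ++ "," ++ PySem.Int.toStr hour ++ ")")]

-- _day_lunch_rows: bucket the sections by lunch_allocations[s][day] (the `none`
-- branch of the lookup is unreachable under Pre_: Python raises there), then the
-- comprehension `[_lunch_row(day, h, buckets[h]) for h in lunch_hours if buckets.get(h)]`
def pvDayLunchRows (lunch_allocations : List (String × List Int)) (sections : List String) (lunch_hours : List Int) (day : Int) : List (List (String × String)) :=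
  let buckets : PySem.Dict Int (List String) :=
    sections.foldl (fun b s =>
      match (PySem.Dict.get? (PySem.Dict.mk lunch_allocations) s).bind
              (fun l => PySem.List.pyGet? l day) with
      | some h => b.modify h [] (· ++ [s])
      | none => b) PySem.Dict.empty
  (lunch_hours.filter (fun h => !(buckets.getD h []).isEmpty)).map
    (fun h => pvLunchRow day h (buckets.getD h []))

def create_lunch_rows_alt (lunch_allocations : List (String × List Int)) (sections : List String) (days : Int) (lunch_hours : List Int) : List (List (String × String)) :=
  if lunch_hours.isEmpty then []
  else (PySem.List.pyRange 0 days 1).flatMap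
         (pvDayLunchRows lunch_allocations sections lunch_hours)

-- ===== PRECONDITION & SPEC =====
-- Pre_: Python A raises (KeyError/IndexError) iff some loop iteration reads
-- lunch_allocations[s][day] for a section s missing from the dict or with fewer
-- than `days` allocated hours; no read happens when days ≤ 0 or lunch_hours = [].
def Pre_create_lunch_rows (lunch_allocations : List (String × List Int)) (sections : List String) (days : Int) (lunch_hours : List Int) : Prop :=
  days ≤ 0 ∨ lunch_hours = [] ∨
    (sections.all (fun s =>
      match PySem.Dict.get? (PySem.Dict.mk lunch_allocations) s with
      | some l => decide (days ≤ (l.length : Int))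
      | none => false)) = true
instance (lunch_allocations : List (String × List Int)) (sections : List String) (days : Int) (lunch_hours : List Int) : Decidable (Pre_create_lunch_rows lunch_allocations sections days lunch_hours) := by unfold Pre_create_lunch_rows; infer_instance

def pvWitness_create_lunch_rows : (List (String × List Int)) × List String × Int × List Int :=
  ([("A", [1, 2]), ("B", [2, 1])], ["A", "B"], 2, [1, 2])

def Spec_create_lunch_rows (lunch_allocations : List (String × List Int)) (sections : List String) (days : Int) (lunch_hours : List Int) (out : List (List (String × String))) : Prop := out = create_lunch_rows_alt lunch_allocations sections days lunch_hours
instance (lunch_allocations : List (String × List Int)) (sections : List String) (days : Int) (lunch_hours : List Int) (out : List (List (String × String))) : Decidable (Spec_create_lunch_rows lunch_allocations sections days lunch_hours out) := by unfold Spec_create_lunch_rows; infer_instance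

-- ===== CLAIM =====
def Claim_equal_create_lunch_rows : Prop := ∀ (lunch_allocations : List (String × List Int)) (sections : List String) (days : Int) (lunch_hours : List Int), Dom_create_lunch_rows lunch_allocations sections days lunch_hours → Pre_create_lunch_rows lunch_allocations sections days lunch_hours → Spec_create_lunch_rows lunch_allocations sections days lunch_hours (create_lunch_rows lunch_allocations sections days lunch_hours)

-- ===== LEMMAS AND PROOFS =====

-- each day's bucket for hour h holds exactly A's filtered section list
theorem pvBuckets_getD (lunch_allocations : List (String × List Int)) (sections : List String) (day : Int) (hour : Int) :
    ((sections.foldl (fun b s =>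
        match (PySem.Dict.get? (PySem.Dict.mk lunch_allocations) s).bind
                (fun l => PySem.List.pyGet? l day) with
        | some h => b.modify h [] (· ++ [s])
        | none => b) PySem.Dict.empty : PySem.Dict Int (List String)).getD hour [])
      = sections.filter (fun s =>
          ((PySem.Dict.get? (PySem.Dict.mk lunch_allocations) s).bind
            (fun l => PySem.List.pyGet? l day)) == some hour) := by
  suffices h : ∀ (b : PySem.Dict Int (List String)),
      (sections.foldl (fun b s =>
        match (PySem.Dict.get? (PySem.Dict.mk lunch_allocations) s).bind
                (fun l => PySem.List.pyGet? l day) with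
        | some h => b.modify h [] (· ++ [s])
        | none => b) b).getD hour []
      = b.getD hour [] ++ sections.filter (fun s =>
          ((PySem.Dict.get? (PySem.Dict.mk lunch_allocations) s).bind
            (fun l => PySem.List.pyGet? l day)) == some hour) by
    simp only [h PySem.Dict.empty, PySem.Dict.getD_empty, List.nil_append]
  induction sections with
  | nil => intro b; simp
  | cons s rest ih =>
    intro b
    simp only [List.foldl_cons, List.filter_cons]
    cases hA : (PySem.Dict.get? (PySem.Dict.mk lunch_allocations) s).bind
                 (fun l => PySem.List.pyGet? l day) with
    | none => simp [ih b, hA]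
    | some h =>
      rw [ih]
      by_cases hh : h = hour
      · subst hh
        simp [hA]
      · simp [hA, PySem.Dict.getD_modify, hh, Ne.symm hh]

-- pvDayLunchRows with the bucket lookups replaced by A's filtered lists
theorem pvDayRows_eq (lunch_allocations : List (String × List Int)) (sections : List String) (lunch_hours : List Int) (day : Int) :
    pvDayLunchRows lunch_allocations sections lunch_hours day
      = (lunch_hours.filter (fun h => !(sections.filter (fun s =>
            ((PySem.Dict.get? (PySem.Dict.mk lunch_allocations) s).bind
              (fun l => PySem.List.pyGet? l day)) == some h)).isEmpty)).map
          (fun h => pvLunchRow day h (sections.filter (fun s =>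
            ((PySem.Dict.get? (PySem.Dict.mk lunch_allocations) s).bind
              (fun l => PySem.List.pyGet? l day)) == some h))) := by
  simp only [pvDayLunchRows, pvBuckets_getD]

-- A's inner fold over lunch_hours appends exactly B's per-day rows
theorem pvInner_eq (lunch_allocations : List (String × List Int)) (sections : List String) (day : Int) (lunch_hours : List Int) (rows : List (List (String × String))) :
    lunch_hours.foldl (fun lunch_rows hour =>
      let secs := sections.filter (fun s =>
        ((PySem.Dict.get? (PySem.Dict.mk lunch_allocations) s).bind
          (fun l => PySem.List.pyGet? l day)) == some hour)
      if secs.isEmpty then lunch_rows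
      else lunch_rows ++ [[("sections", PySem.Str.join ", " secs),
                           ("subjects", "LUNCH_DAY_" ++ PySem.Int.toStr (day + 1) ++ "_HOUR_" ++ PySem.Int.toStr hour),
                           ("staffs", ""), ("theory", ""), ("lab", ""),
                           ("block", "(" ++ PySem.Int.toStr (day + 1) ++ "," ++ PySem.Int.toStr hour ++ ")")]]) rows
      = rows ++ pvDayLunchRows lunch_allocations sections lunch_hours day := by
  rw [pvDayRows_eq]
  induction lunch_hours generalizing rows with
  | nil => simp
  | cons hour rest ih =>
    rw [List.foldl_cons, ih]
    by_cases he : (sections.filter (fun s =>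
        ((PySem.Dict.get? (PySem.Dict.mk lunch_allocations) s).bind
          (fun l => PySem.List.pyGet? l day)) == some hour)).isEmpty
    · simp [he]
    · simp [he, pvLunchRow]

-- A's outer fold over the days flattens B's per-day row lists
theorem pvOuter_eq (lunch_allocations : List (String × List Int)) (sections : List String) (lunch_hours : List Int) (ds : List Int) (rows : List (List (String × String))) :
    ds.foldl (fun lunch_rows day =>
      lunch_hours.foldl (fun lunch_rows hour =>
        let secs := sections.filter (fun s =>
          ((PySem.Dict.get? (PySem.Dict.mk lunch_allocations) s).bind
            (fun l => PySem.List.pyGet? l day)) == some hour)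
        if secs.isEmpty then lunch_rows
        else lunch_rows ++ [[("sections", PySem.Str.join ", " secs),
                             ("subjects", "LUNCH_DAY_" ++ PySem.Int.toStr (day + 1) ++ "_HOUR_" ++ PySem.Int.toStr hour),
                             ("staffs", ""), ("theory", ""), ("lab", ""),
                             ("block", "(" ++ PySem.Int.toStr (day + 1) ++ "," ++ PySem.Int.toStr hour ++ ")")]]) lunch_rows) rows
      = rows ++ ds.flatMap (pvDayLunchRows lunch_allocations sections lunch_hours) := by
  induction ds generalizing rows with
  | nil => simp
  | cons day rest ih =>
    simp only [List.foldl_cons, List.flatMap_cons, pvInner_eq]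
    rw [PySem.List.foldl_append_eq_flatMap, List.append_assoc]

-- ===== VERDICT =====
theorem create_lunch_rows_spec : Claim_equal_create_lunch_rows := by
  intro la sections days lunch_hours _ _
  show create_lunch_rows la sections days lunch_hours = create_lunch_rows_alt la sections days lunch_hours
  unfold create_lunch_rows create_lunch_rows_alt
  by_cases hlh : lunch_hours.isEmpty
  · rw [List.isEmpty_iff] at hlh
    simp [hlh]
  · simp only [hlh, if_neg, Bool.false_eq_true, not_false_iff]
    rw [pvOuter_eq, List.nil_append]
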